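-- pv_equiv track=rewrite | github.com/tdalford/FTS_simulation_results | RayTraceFunctionsv2.py | get_mirrors
-- ===== SOURCE A (Python) =====
-- def get_mirrors(instruction_set, polarizer_order=[1, 2, 3, 4]):
--     # Have numbers for side1, side2
--     polarizer_index = 0
--     side1 = [9, 3, 4, 6, 7]
--     side2 = [8, 1, 2, 5, None]
--     sides = [side1, side2]
--
--     pointer = 0
--     # We start on side1
--     side = 0
--     values = []
--
--     for instruction in instruction_set:
--         if instruction == 'T':
--             side = 1 - side
--         value = sides[side][pointer]
--         if instruction in ['T', 'R']:
--             values.append(instruction + str(polarizer_order[polarizer_index]))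
--             polarizer_index += 1
--         else:
--             values.append(instruction + '0')
--         # now add the mirror afterwards
--         values.append('E' + str(value))
--         pointer += 1
--     return values
-- ===== SOURCE B (Python) =====
-- def get_mirrors(instruction_set, polarizer_order=[1, 2, 3, 4]):
--     # Stateless per-position recomputation: each label is derived from prefix
--     # counts of the instruction list instead of threading mutable loop state.
--     side1 = [9, 3, 4, 6, 7]
--     side2 = [8, 1, 2, 5, None]
--     out = []
--     for i, ins in enumerate(instruction_set):
--         prefix = instruction_set[:i + 1]
--         if ins in ('T', 'R'):
--             head = ins + str(polarizer_order[prefix.count('T') + prefix.count('R') - 1])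
--         else:
--             head = ins + '0'
--         row = side2 if prefix.count('T') % 2 == 1 else side1
--         out.append(head)
--         out.append('E' + str(row[i]))
--     return out
-- ===== Notes on version B (the rewrite author's own statement) =====
-- stated objective: alternative
-- what changed: B drops A's threaded mutable state (pointer, side flag, polarizer index) and recomputes each position's label independently from prefix counts of 'T' and 'T'/'R' over instruction_set[:i+1]; parity of the T-count selects the mirror row.
import Mathlib
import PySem

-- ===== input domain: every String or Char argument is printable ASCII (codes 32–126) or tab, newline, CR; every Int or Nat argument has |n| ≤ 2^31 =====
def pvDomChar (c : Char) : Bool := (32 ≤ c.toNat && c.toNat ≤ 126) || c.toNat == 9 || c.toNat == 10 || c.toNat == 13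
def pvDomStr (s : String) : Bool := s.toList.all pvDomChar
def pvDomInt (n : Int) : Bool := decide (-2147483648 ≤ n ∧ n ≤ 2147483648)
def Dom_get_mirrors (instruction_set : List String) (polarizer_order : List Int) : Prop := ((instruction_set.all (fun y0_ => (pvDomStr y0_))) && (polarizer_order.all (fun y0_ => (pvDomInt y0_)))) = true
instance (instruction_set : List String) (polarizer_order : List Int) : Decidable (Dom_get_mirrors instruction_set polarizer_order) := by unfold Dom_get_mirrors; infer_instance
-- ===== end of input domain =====

-- B recomputes each position's label from prefix counts of the instruction list
-- instead of threading mutable loop state (objective: alternative, not faster).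

-- ===== PORT A =====
-- str(v) where v is an element of side1/side2: an int or None
def pvValStr (v : Option Int) : String :=
  match v with
  | none => "None"
  | some n => PySem.Int.toStr n

def pvStepA (polarizer_order : List Int) (st : Int × Int × Int × List String)
    (instruction : String) : Int × Int × Int × List String :=
  let side1 : List (Option Int) := [some 9, some 3, some 4, some 6, some 7]
  let side2 : List (Option Int) := [some 8, some 1, some 2, some 5, none]
  let sides : List (List (Option Int)) := [side1, side2]
  let polarizer_index := st.1
  let pointer := st.2.1
  let side := st.2.2.1
  let values := st.2.2.2
  let side := if instruction == "T" then 1 - side else side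
  -- sides[side][pointer]; defaults are unreachable under Pre_get_mirrors
  let value := PySem.List.pyGetD (PySem.List.pyGetD sides side []) pointer (some 0)
  let pv :=
    if instruction == "T" || instruction == "R" then
      (polarizer_index + 1,
       values ++ [instruction ++ PySem.Int.toStr (PySem.List.pyGetD polarizer_order polarizer_index 0)])
    else (polarizer_index, values ++ [instruction ++ "0"])
  (pv.1, pointer + 1, side, pv.2 ++ ["E" ++ pvValStr value])

def get_mirrors (instruction_set : List String) (polarizer_order : List Int) : List String :=
  (instruction_set.foldl (pvStepA polarizer_order) (0, 0, 0, [])).2.2.2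

-- ===== PORT B =====
def pvBodyB (instruction_set : List String) (polarizer_order : List Int)
    (out : List String) (p : Int × String) : List String :=
  let side1 : List (Option Int) := [some 9, some 3, some 4, some 6, some 7]
  let side2 : List (Option Int) := [some 8, some 1, some 2, some 5, none]
  let i := p.1
  let ins := p.2
  let prefx := PySem.List.slice instruction_set none (some (i + 1))
  let head :=
    if ins == "T" || ins == "R" then
      ins ++ PySem.Int.toStr (PySem.List.pyGetD polarizer_order
        (((PySem.List.count prefx "T" : Int)) + ((PySem.List.count prefx "R" : Int)) - 1) 0)
    else ins ++ "0"
  let row := if PySem.List.count prefx "T" % 2 == 1 then side2 else side1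
  out ++ [head, "E" ++ pvValStr (PySem.List.pyGetD row i (some 0))]

def get_mirrors_alt (instruction_set : List String) (polarizer_order : List Int) : List String :=
  (PySem.List.enumerate instruction_set 0).foldl (pvBodyB instruction_set polarizer_order) []

-- ===== PRECONDITION & SPEC =====
-- Pre_ excludes exactly the inputs where Python A raises IndexError: more than 5
-- instructions (the mirror rows have 5 entries), or more 'T'/'R' instructions
-- than there are polarizer_order entries.
def Pre_get_mirrors (instruction_set : List String) (polarizer_order : List Int) : Prop :=
  instruction_set.length ≤ 5 ∧
  instruction_set.count "T" + instruction_set.count "R" ≤ polarizer_order.length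
instance (instruction_set : List String) (polarizer_order : List Int) : Decidable (Pre_get_mirrors instruction_set polarizer_order) := by unfold Pre_get_mirrors; infer_instance

def pvWitness_get_mirrors : List String × List Int := (["T", "E", "R"], [3, 7])

def Spec_get_mirrors (instruction_set : List String) (polarizer_order : List Int) (out : List String) : Prop := out = get_mirrors_alt instruction_set polarizer_order
instance (instruction_set : List String) (polarizer_order : List Int) (out : List String) : Decidable (Spec_get_mirrors instruction_set polarizer_order out) := by unfold Spec_get_mirrors; infer_instance

-- ===== CLAIM (what is proved, stated in full; the proofs are below) =====
def Claim_equal_get_mirrors : Prop := ∀ (instruction_set : List String) (polarizer_order : List Int), Dom_get_mirrors instruction_set polarizer_order → Pre_get_mirrors instruction_set polarizer_order → Spec_get_mirrors instruction_set polarizer_order (get_mirrors instruction_set polarizer_order)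

-- ===== LEMMAS AND PROOFS =====

-- B as a flatMap over the enumerated list
lemma alt_eq_flatMap (xs : List String) (po : List Int) :
    get_mirrors_alt xs po =
      (PySem.List.enumerate xs 0).flatMap (fun p => pvBodyB xs po [] p) := by
  unfold get_mirrors_alt
  rw [show (pvBodyB xs po) = (fun acc p => acc ++ pvBodyB xs po [] p) from
    funext fun acc => funext fun p => by simp [pvBodyB]]
  rw [PySem.List.foldl_append_eq_flatMap]
  simp

-- the body of B at index k < xs.length only looks at take (k+1) xs
lemma bodyB_append (xs : List String) (x : String) (po : List Int) (k : Nat) (hk : k < xs.length) :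
    pvBodyB (xs ++ [x]) po [] ((k : Int), xs[k]) = pvBodyB xs po [] ((k : Int), xs[k]) := by
  have hcast : ((k : Int) + 1) = (((k + 1 : Nat)) : Int) := by push_cast; ring
  simp only [pvBodyB, hcast, PySem.List.slice_to_natCast,
    List.take_append_of_le_length (by omega : k + 1 ≤ xs.length)]

lemma alt_snoc (xs : List String) (x : String) (po : List Int) :
    get_mirrors_alt (xs ++ [x]) po =
      get_mirrors_alt xs po ++ pvBodyB (xs ++ [x]) po [] ((xs.length : Int), x) := by
  rw [alt_eq_flatMap, alt_eq_flatMap, PySem.List.enumerate_append,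
    List.flatMap_append]
  have h1 : (PySem.List.enumerate xs 0).flatMap (fun p => pvBodyB (xs ++ [x]) po [] p) =
      (PySem.List.enumerate xs 0).flatMap (fun p => pvBodyB xs po [] p) := by
    apply List.flatMap_congr
    intro p hp
    rcases (PySem.List.mem_enumerate_iff xs 0 p).1 hp with ⟨k, hk, rfl⟩
    simpa using bodyB_append xs x po k hk
  rw [h1]
  simp [PySem.List.enumerate_cons, PySem.List.enumerate_nil]

-- selecting the mirror row: A's 0/1 side index vs B's parity test pick the same row
lemma pvRowSel (n : Nat) (e : Int) (t : Nat) (he : e = (t : Int) % 2) :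
    pvValStr ((PySem.List.pyGetD [[some 9, some 3, some 4, some 6, some 7],
        [some 8, some 1, some 2, some 5, none]] e ([] : List (Option Int)))[n]?.getD (some 0)) =
    pvValStr ((if t % 2 = 1 then [some 8, some 1, some 2, some 5, none]
        else [some 9, some 3, some 4, some 6, some 7])[n]?.getD (some 0)) := by
  rcases Nat.mod_two_eq_zero_or_one t with hp | hp
  · rw [if_neg (by omega), show e = 0 from by omega]
    rfl
  · rw [if_pos hp, show e = 1 from by omega]
    rfl

-- loop invariant for A's fold
lemma foldA_spec (po : List Int) (xs : List String) :
    xs.foldl (pvStepA po) (0, 0, 0, []) =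
      ((xs.count "T" + xs.count "R" : Int), (xs.length : Int),
        ((xs.count "T" : Int)) % 2, get_mirrors_alt xs po) := by
  induction xs using List.reverseRecOn with
  | nil => simp [get_mirrors_alt, PySem.List.enumerate_nil]
  | append_singleton xs x ih =>
    rw [List.foldl_append, List.foldl_cons, List.foldl_nil, ih, alt_snoc]
    have hpre : PySem.List.slice (xs ++ [x]) none (some ((xs.length : Int) + 1)) = xs ++ [x] := by
      rw [show ((xs.length : Int) + 1) = (((xs.length + 1 : Nat)) : Int) from by push_cast; ring,
        PySem.List.slice_to_natCast]
      simp
    rcases Int.emod_two_eq (xs.count "T" : Int) with hpar | hpar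
    all_goals by_cases hT : x = "T" <;> by_cases hR : x = "R"
    all_goals simp_all [pvStepA, pvBodyB, List.count_append, PySem.List.count_eq, Prod.ext_iff]
    -- (T-count even, x = "T")
    · refine ⟨by omega, by omega, ?_, pvRowSel xs.length _ (List.count "T" xs + 1) (by omega)⟩
      congr 2
      omega
    -- (even, x = "R")
    · refine ⟨by omega, ?_, pvRowSel xs.length _ (List.count "T" xs) (by omega)⟩
      congr 2
      omega
    -- (even, other)
    · exact pvRowSel xs.length _ (List.count "T" xs) (by omega)
    -- (odd, x = "T")
    · refine ⟨by omega, by omega, ?_, pvRowSel xs.length 0 (List.count "T" xs + 1) (by omega)⟩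
      congr 2
      omega
    -- (odd, x = "R")
    · refine ⟨by omega, ?_, pvRowSel xs.length 1 (List.count "T" xs) (by omega)⟩
      congr 2
      omega
    -- (odd, other)
    · exact pvRowSel xs.length 1 (List.count "T" xs) (by omega)


lemma ports_agree (xs : List String) (po : List Int) :
    get_mirrors xs po = get_mirrors_alt xs po := by
  simp [get_mirrors, foldA_spec]

-- ===== VERDICT (by name: the statement is the Claim_ definition above) =====
theorem get_mirrors_spec : Claim_equal_get_mirrors := by
  intro xs po _ _
  unfold Spec_get_mirrors
  exact ports_agree xs po
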